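-- pv_equiv track=rewrite | github.com/prvnlhr/Python-DSA | Data Structure/DP1/Practice/ByteLandain.py | byteLandianRec
-- ===== SOURCE A (Python) =====
-- def byteLandianRec(n):
--     if n == 0 or n == 1:
--         return n
--
--     ans1 = byteLandianRec(n // 2)
--     ans2 = byteLandianRec(n // 3)
--     ans3 = byteLandianRec(n // 4)
--     ans = ans1 + ans2 + ans3
--     return max(n, ans)
-- ===== SOURCE B (Python) =====
-- def byteLandianRec(n):
--     memo = {}
--
--     def go(k):
--         v = memo.get(k)
--         if v is not None:
--             return v
--         if k < 2:
--             v = k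
--         else:
--             v = max(k, go(k // 2) + go(k // 3) + go(k // 4))
--         memo[k] = v
--         return v
--
--     return go(n)
-- ===== Notes on version B (the rewrite author's own statement) =====
-- stated objective: faster
-- what changed: Replaced the naive exponential triple recursion with a dict-memoized recursion, so each distinct subproblem value (polylogarithmically many) is computed once.
-- crash fix: For negative n A recurses forever and raises RecursionError, while B's base case returns n itself. — e.g. on byteLandianRec(-1): A raises RecursionError, B returns -1
import Mathlib
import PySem

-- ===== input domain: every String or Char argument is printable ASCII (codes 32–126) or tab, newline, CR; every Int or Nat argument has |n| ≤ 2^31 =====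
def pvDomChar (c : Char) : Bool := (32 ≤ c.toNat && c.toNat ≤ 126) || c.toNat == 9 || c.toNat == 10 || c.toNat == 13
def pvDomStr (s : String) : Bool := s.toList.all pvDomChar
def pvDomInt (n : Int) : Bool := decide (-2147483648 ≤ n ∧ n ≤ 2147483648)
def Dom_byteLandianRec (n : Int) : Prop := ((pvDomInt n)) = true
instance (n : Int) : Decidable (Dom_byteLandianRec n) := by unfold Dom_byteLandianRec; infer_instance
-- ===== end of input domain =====

-- B replaces A's naive exponential triple recursion with a dict-memoized recursion (faster).


-- ===== PORT A =====
-- A's recursion, on the Nat value of n: for n ≥ 0 (Pre_) Python's n//2, n//3, n//4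
-- are exactly Nat division, so this is a step-for-step transliteration of A there.
def byteLandianRecNat (n : Nat) : Int :=
  if _h : n = 0 ∨ n = 1 then n
  else
    let ans1 := byteLandianRecNat (n / 2)
    let ans2 := byteLandianRecNat (n / 3)
    let ans3 := byteLandianRecNat (n / 4)
    let ans := ans1 + ans2 + ans3
    max (n : Int) ans
termination_by n
decreasing_by
  all_goals exact Nat.div_lt_self (by omega) (by omega)

-- For n < 0 Python A never returns (RecursionError), excluded by Pre_; the guard only makes the port total.
def byteLandianRec (n : Int) : Int :=
  if n < 0 then n else byteLandianRecNat n.toNat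

-- ===== PORT B =====
-- B's inner `go` with its memo dict threaded through; fuel only makes the recursion
-- structural (fuel > k always suffices since every recursive argument is < k).
def byteLandianGo : Nat → Nat → PySem.Dict Nat Int → Int × PySem.Dict Nat Int
  | 0, k, memo => ((k : Int), memo)   -- unreachable for fuel > k
  | fuel + 1, k, memo =>
    match memo.get? k with
    | some v => (v, memo)
    | none =>
      if k < 2 then ((k : Int), memo.insert k (k : Int))
      else
        let r1 := byteLandianGo fuel (k / 2) memo
        let r2 := byteLandianGo fuel (k / 3) r1.2
        let r3 := byteLandianGo fuel (k / 4) r2.2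
        let v := max (k : Int) (r1.1 + r2.1 + r3.1)
        (v, r3.2.insert k v)

-- B's go(k) for k < 2 returns k immediately (covers n < 0 too, where Python B also returns n).
def byteLandianRec_alt (n : Int) : Int :=
  if n < 2 then n
  else (byteLandianGo (n.toNat + 1) n.toNat PySem.Dict.empty).1

-- ===== PRECONDITION & SPEC =====
-- Pre_ excludes negative n, where Python A recurses forever (RecursionError).
def Pre_byteLandianRec (n : Int) : Prop := 0 ≤ n
instance (n : Int) : Decidable (Pre_byteLandianRec n) := by unfold Pre_byteLandianRec; infer_instance
def pvWitness_byteLandianRec : Int := (12)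

-- For negative n A recurses forever and raises RecursionError, while B's base case returns n itself.
def Raises_byteLandianRec (n : Int) : Prop := n < 0
instance (n : Int) : Decidable (Raises_byteLandianRec n) := by unfold Raises_byteLandianRec; infer_instance
def pvRaiseWitness_byteLandianRec : Int := (-1)
def pvRaiseWitnessOut_byteLandianRec : Int := -1

def Spec_byteLandianRec (n : Int) (out : Int) : Prop := out = byteLandianRec_alt n
instance (n : Int) (out : Int) : Decidable (Spec_byteLandianRec n out) := by unfold Spec_byteLandianRec; infer_instance

-- ===== CLAIM (what is proved, stated in full; the proofs are below) =====
def Claim_equal_byteLandianRec : Prop := ∀ (n : Int), Dom_byteLandianRec n → Pre_byteLandianRec n → Spec_byteLandianRec n (byteLandianRec n)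
def Claim_raises_byteLandianRec : Prop := (∀ (n : Int), Dom_byteLandianRec n → Raises_byteLandianRec n → ¬ Pre_byteLandianRec n) ∧ (Dom_byteLandianRec (pvRaiseWitness_byteLandianRec) ∧ Raises_byteLandianRec (pvRaiseWitness_byteLandianRec) ∧ byteLandianRec_alt (pvRaiseWitness_byteLandianRec) = pvRaiseWitnessOut_byteLandianRec)

-- ===== LEMMAS AND PROOFS =====

-- the memo only ever holds correct values
def MemoOK (memo : PySem.Dict Nat Int) : Prop :=
  ∀ k v, memo.get? k = some v → v = byteLandianRecNat k

theorem memoOK_empty : MemoOK PySem.Dict.empty := by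
  intro k v h; simp [PySem.Dict.get?_empty] at h

theorem memoOK_insert (memo : PySem.Dict Nat Int) (k : Nat)
    (h : MemoOK memo) (hv : v = byteLandianRecNat k) :
    MemoOK (memo.insert k v) := by
  intro k' v' h'
  rw [PySem.Dict.get?_insert] at h'
  split at h'
  · cases h'; subst ‹k' = k›; exact hv
  · exact h k' v' h'

theorem byteLandianRecNat_base (k : Nat) (hk : k < 2) :
    byteLandianRecNat k = (k : Int) := by
  rw [byteLandianRecNat]; simp [show k = 0 ∨ k = 1 by omega]

theorem goB_correct : ∀ (fuel k : Nat) (memo : PySem.Dict Nat Int),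
    k < fuel → MemoOK memo →
    (byteLandianGo fuel k memo).1 = byteLandianRecNat k ∧
    MemoOK (byteLandianGo fuel k memo).2 := by
  intro fuel
  induction fuel with
  | zero => intro k memo hk; omega
  | succ fuel ih =>
    intro k memo hk hmem
    rw [byteLandianGo]
    cases hget : memo.get? k with
    | some v => exact ⟨hmem k v hget, hmem⟩
    | none =>
      by_cases h2 : k < 2
      · simp only [h2, if_true]
        exact ⟨(byteLandianRecNat_base k h2).symm,
               memoOK_insert memo k hmem (byteLandianRecNat_base k h2).symm⟩
      · simp only [h2, if_false]
        have hlt : ∀ d, 2 ≤ d → k / d < fuel := by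
          intro d hd
          have := Nat.div_lt_self (n := k) (by omega) (by omega : 1 < d)
          omega
        obtain ⟨e1, m1⟩ := ih (k / 2) memo (hlt 2 (by omega)) hmem
        obtain ⟨e2, m2⟩ := ih (k / 3) _ (hlt 3 (by omega)) m1
        obtain ⟨e3, m3⟩ := ih (k / 4) _ (hlt 4 (by omega)) m2
        constructor
        · show max (k : Int) _ = _
          rw [e1, e2, e3]
          conv_rhs => rw [byteLandianRecNat]
          simp [show ¬(k = 0 ∨ k = 1) by omega]
        · exact memoOK_insert _ k m3 (by
            rw [e1, e2, e3]
            conv_rhs => rw [byteLandianRecNat]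
            simp [show ¬(k = 0 ∨ k = 1) by omega])

-- ===== VERDICT (by name: the statement is the Claim_ definition above) =====
theorem byteLandianRec_spec : Claim_equal_byteLandianRec := by
  intro n _ hpre
  unfold Spec_byteLandianRec byteLandianRec byteLandianRec_alt
  have h0 : ¬ n < 0 := by exact not_lt.mpr hpre
  rw [if_neg h0]
  by_cases h2 : n < 2
  · rw [if_pos h2, byteLandianRecNat_base n.toNat (by omega)]
    omega
  · rw [if_neg h2,
        (goB_correct (n.toNat + 1) n.toNat PySem.Dict.empty (by omega) memoOK_empty).1]

@[simp] theorem byteLandianRec_raises : Claim_raises_byteLandianRec := by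
  unfold Claim_raises_byteLandianRec
  exact ⟨fun n _ hr hp => by unfold Raises_byteLandianRec at hr; unfold Pre_byteLandianRec at hp; omega,
         by decide⟩
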